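-- pv_equiv track=rewrite | github.com/CrookedPotatoe/ramKnightASCII | main.py | determine_new_state
-- ===== SOURCE A (Python) =====
-- _victory = 0
--
-- _unfinished = 2
--
-- _defeated = 3
--
-- def determine_new_state(s):
--     for i, l in enumerate(s):
--         for j, c in enumerate(l):
--             if c in "Y":
--                 return _defeated
--             elif c in "@":
--                 return _victory
--
--     return _unfinished
-- ===== SOURCE B (Python) =====
-- def determine_new_state(s):
--     # Flatten the grid, locate the knight and the goal by index, and compare positions.
--     flat = [c for row in s for c in row]
--     yi = flat.index("Y") if "Y" in flat else -1
--     ai = flat.index("@") if "@" in flat else -1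
--     if yi == -1 and ai == -1:
--         return 2
--     if ai == -1:
--         return 3
--     if yi == -1:
--         return 0
--     return 3 if yi < ai else 0
-- ===== Notes on version B (the rewrite author's own statement) =====
-- stated objective: alternative
-- what changed: Replaces A's interleaved nested-loop early-return scan by flattening the grid and doing two independent index searches (first 'Y', first '@') whose positions are then compared to pick the state.
-- intended difference: On grids whose first cell among {'', 'Y', '@'} (row-major) is the empty string and whose first real 'Y'/'@' is not 'Y', A returns _defeated (3) because '' is accidentally a substring of 'Y'; B ignores empty cells and returns the state of the first real marker (or 2 if none), which is the intended reading of the scan. — e.g. on determine_new_state([[""]]): A returns 3, B returns 2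
import Mathlib
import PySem

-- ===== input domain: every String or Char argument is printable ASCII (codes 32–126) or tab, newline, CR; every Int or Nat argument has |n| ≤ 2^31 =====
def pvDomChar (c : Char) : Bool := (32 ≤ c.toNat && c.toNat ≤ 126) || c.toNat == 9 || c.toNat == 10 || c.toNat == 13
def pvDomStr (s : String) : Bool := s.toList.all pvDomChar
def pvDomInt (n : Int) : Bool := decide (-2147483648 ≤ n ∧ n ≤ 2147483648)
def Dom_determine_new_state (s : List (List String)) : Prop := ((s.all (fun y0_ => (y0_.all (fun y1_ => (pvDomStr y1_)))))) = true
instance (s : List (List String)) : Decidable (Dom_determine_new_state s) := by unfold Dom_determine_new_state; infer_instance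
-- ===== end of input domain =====

-- B flattens the grid and locates 'Y' and '@' by two independent index searches, comparing
-- positions, instead of A's interleaved nested-loop early-return scan (objective: alternative);
-- B intentionally ignores empty-string cells, which A's substring test accidentally treats as 'Y' (see D_).


-- ===== PORT A =====
-- inner loop over a row: first early return it would hit, if any
def dnsRowA (l : List String) : Option Int :=
  match l with
  | [] => none
  | c :: rest =>
    if PySem.Str.isIn c "Y" then some 3
    else if PySem.Str.isIn c "@" then some 0
    else dnsRowA rest

-- outer loop over rows
def dnsRowsA (s : List (List String)) : Option Int :=
  match s with
  | [] => none
  | l :: rest =>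
    match dnsRowA l with
    | some r => some r
    | none => dnsRowsA rest

def determine_new_state (s : List (List String)) : Int :=
  match dnsRowsA s with
  | some r => r
  | none => 2

-- ===== PORT B =====
def dnsAltCore (flat : List String) : Int :=
  let yi : Int := if flat.contains "Y" then ((PySem.List.index? flat "Y").getD 0 : Nat) else -1
  let ai : Int := if flat.contains "@" then ((PySem.List.index? flat "@").getD 0 : Nat) else -1
  if yi = -1 ∧ ai = -1 then 2
  else if ai = -1 then 3
  else if yi = -1 then 0
  else if yi < ai then 3 else 0

def determine_new_state_alt (s : List (List String)) : Int :=
  dnsAltCore (s.flatMap (fun row => row))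

-- ===== PRECONDITION & SPEC =====
-- On grids whose first cell among {"", "Y", "@"} (row-major) is the empty string and whose first
-- real "Y"/"@" cell is not "Y", A returns 3 (_defeated) because "" is accidentally a substring of
-- "Y"; B ignores empty cells and returns the state of the first real marker (or 2 if none), the
-- intended reading of the scan.
def D_determine_new_state (s : List (List String)) : Prop :=
  let f := s.flatMap fun r => r
  f.find? (["", "Y", "@"].contains ·) = some "" ∧ f.find? (["Y", "@"].contains ·) ≠ some "Y"
instance (s : List (List String)) : Decidable (D_determine_new_state s) := by
  unfold D_determine_new_state; infer_instance

def Spec_determine_new_state (s : List (List String)) (out : Int) : Prop :=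
  ¬ D_determine_new_state s → out = determine_new_state_alt s
instance (s : List (List String)) (out : Int) : Decidable (Spec_determine_new_state s out) := by
  unfold Spec_determine_new_state; infer_instance

def pvDiffWitness_determine_new_state : List (List String) := [[""]]
def pvDiffWitnessOut_determine_new_state : Int × Int := (3, 2)

-- ===== CLAIM (what is proved, stated in full; the proofs are below) =====
def Claim_unchanged_determine_new_state : Prop := ∀ (s : List (List String)), Dom_determine_new_state s → Spec_determine_new_state s (determine_new_state s)
def Claim_changed_determine_new_state : Prop := Dom_determine_new_state (pvDiffWitness_determine_new_state) ∧ D_determine_new_state (pvDiffWitness_determine_new_state) ∧ determine_new_state (pvDiffWitness_determine_new_state) = pvDiffWitnessOut_determine_new_state.1 ∧ determine_new_state_alt (pvDiffWitness_determine_new_state) = pvDiffWitnessOut_determine_new_state.2 ∧ pvDiffWitnessOut_determine_new_state.1 ≠ pvDiffWitnessOut_determine_new_state.2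
def Claim_exact_determine_new_state : Prop := ∀ (s : List (List String)), Dom_determine_new_state s → D_determine_new_state s → determine_new_state s ≠ determine_new_state_alt s

-- ===== LEMMAS AND PROOFS =====

theorem predP_eq :
    (fun c : String => (["", "Y", "@"] : List String).contains c) =
      (fun c : String => c == "" || c == "Y" || c == "@") := by
  funext c
  by_cases h0 : c = "" <;> by_cases h1 : c = "Y" <;> by_cases h2 : c = "@" <;> simp [h0, h1, h2]

theorem predQ_eq :
    (fun c : String => (["Y", "@"] : List String).contains c) =
      (fun c : String => c == "Y" || c == "@") := by
  funext c
  by_cases h1 : c = "Y" <;> by_cases h2 : c = "@" <;> simp [h1, h2]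

theorem D_iff (s : List (List String)) :
    D_determine_new_state s ↔
      ((s.flatMap (fun row => row)).find? (fun c => c == "" || c == "Y" || c == "@") = some "" ∧
       (s.flatMap (fun row => row)).find? (fun c => c == "Y" || c == "@") ≠ some "Y") := by
  unfold D_determine_new_state
  rw [predP_eq, predQ_eq]

-- `c in x` for a one-character Python string x holds exactly for c = "" and c = x
theorem isIn_char_false (c : String) (a : Char) (h1 : c ≠ "") (h2 : c.toList ≠ [a]) :
    PySem.Chars.isIn c.toList [a] = false := by
  rw [Bool.eq_false_iff]
  intro ht
  have harg : PySem.Str.isIn c (String.ofList [a]) = true := by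
    simpa [PySem.Str.isIn] using ht
  have hinf : c.toList <:+: [a] := by
    simpa using (PySem.Str.isIn_iff_infix c (String.ofList [a])).mp harg
  rcases List.sublist_singleton.mp hinf.sublist with h | h
  · exact h1 (String.toList_inj.mp (by simpa using h))
  · exact h2 h

theorem rowA_eq_find (l : List String) :
    dnsRowA l = (l.find? (fun c => c == "" || c == "Y" || c == "@")).map
      (fun hit => if hit == "@" then (0 : Int) else 3) := by
  induction l with
  | nil => simp [dnsRowA]
  | cons c rest ih =>
    by_cases h1 : c = ""
    · subst h1
      simp [dnsRowA, List.find?, PySem.Str.isIn,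
        (by decide : PySem.Chars.isIn ([] : List Char) ['Y'] = true)]
    · by_cases h2 : c = "Y"
      · subst h2
        simp [dnsRowA, List.find?, PySem.Str.isIn,
          (by decide : PySem.Chars.isIn ['Y'] ['Y'] = true)]
      · by_cases h3 : c = "@"
        · subst h3
          simp [dnsRowA, List.find?, PySem.Str.isIn,
            (by decide : PySem.Chars.isIn ['@'] ['Y'] = false),
            (by decide : PySem.Chars.isIn ['@'] ['@'] = true)]
        · have b1 : (c == "") = false := by simpa using h1
          have b2 : (c == "Y") = false := by simpa using h2
          have b3 : (c == "@") = false := by simpa using h3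
          have hY : c.toList ≠ ['Y'] := fun h => h2 (String.toList_inj.mp (by simpa using h))
          have hA : c.toList ≠ ['@'] := fun h => h3 (String.toList_inj.mp (by simpa using h))
          simp [dnsRowA, List.find?, PySem.Str.isIn,
            isIn_char_false c 'Y' h1 hY, isIn_char_false c '@' h1 hA, b1, b2, b3, ih]

theorem rowsA_eq_find (s : List (List String)) :
    dnsRowsA s = ((s.flatMap (fun row => row)).find?
        (fun c => c == "" || c == "Y" || c == "@")).map
      (fun hit => if hit == "@" then (0 : Int) else 3) := by
  induction s with
  | nil => simp [dnsRowsA]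
  | cons l rest ih =>
    simp only [dnsRowsA, rowA_eq_find, ih, List.flatMap_cons, List.find?_append]
    cases (l.find? (fun c => c == "" || c == "Y" || c == "@")) <;> simp

-- characterisation of A via the flattened first decisive cell
theorem A_char (s : List (List String)) :
    determine_new_state s =
      match (s.flatMap (fun row => row)).find? (fun c => c == "" || c == "Y" || c == "@") with
      | none => 2
      | some hit => if hit == "@" then (0 : Int) else 3 := by
  unfold determine_new_state
  rw [rowsA_eq_find]
  cases (s.flatMap (fun row => row)).find? (fun c => c == "" || c == "Y" || c == "@") <;> rfl

-- characterisation of B via the flattened first marker cell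
theorem B_char (flat : List String) :
    dnsAltCore flat =
      match flat.find? (fun c => c == "Y" || c == "@") with
      | none => 2
      | some hit => if hit == "@" then (0 : Int) else 3 := by
  induction flat with
  | nil => simp [dnsAltCore]
  | cons c rest ih =>
    by_cases h2 : c = "Y"
    · subst h2
      rw [List.find?_cons_of_pos (p := fun x => x == "Y" || x == "@") (by decide)]
      simp only [dnsAltCore]
      rw [PySem.List.index?_cons_self, PySem.List.index?_cons_of_ne rest (by decide : ("Y" : String) ≠ "@")]
      cases hia : PySem.List.index? rest "@" with
      | none =>
        have hca : ("@" : String) ∉ rest := (PySem.List.index?_eq_none_iff rest "@").mp hia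
        simp [hca]
      | some j =>
        have hca : ("@" : String) ∈ rest :=
          (PySem.List.index?_isSome_iff rest "@").mp (by rw [hia]; rfl)
        simp [hca]
    · by_cases h3 : c = "@"
      · subst h3
        rw [List.find?_cons_of_pos (p := fun x => x == "Y" || x == "@") (by decide)]
        simp only [dnsAltCore]
        rw [PySem.List.index?_cons_self, PySem.List.index?_cons_of_ne rest (by decide : ("@" : String) ≠ "Y")]
        cases hiy : PySem.List.index? rest "Y" with
        | none =>
          have hcy : ("Y" : String) ∉ rest := (PySem.List.index?_eq_none_iff rest "Y").mp hiy
          simp [hcy]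
        | some k =>
          have hcy : ("Y" : String) ∈ rest :=
            (PySem.List.index?_isSome_iff rest "Y").mp (by rw [hiy]; rfl)
          simp [hcy]
          try (intros; omega)
      · have b2 : (c == "Y") = false := by simpa using h2
        have b3 : (c == "@") = false := by simpa using h3
        have hne2 : ¬ ("Y" : String) = c := fun h => h2 h.symm
        have hne3 : ¬ ("@" : String) = c := fun h => h3 h.symm
        rw [List.find?_cons_of_neg (p := fun x => x == "Y" || x == "@") (by simp [b2, b3])]
        rw [← ih]
        simp only [dnsAltCore]
        rw [PySem.List.index?_cons_of_ne rest h2, PySem.List.index?_cons_of_ne rest h3]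
        cases hiy : PySem.List.index? rest "Y" with
        | none =>
          have hcy : ("Y" : String) ∉ rest := (PySem.List.index?_eq_none_iff rest "Y").mp hiy
          cases hia : PySem.List.index? rest "@" with
          | none =>
            have hca : ("@" : String) ∉ rest := (PySem.List.index?_eq_none_iff rest "@").mp hia
            simp [hcy, hca, hne2, hne3]
          | some j =>
            have hca : ("@" : String) ∈ rest :=
              (PySem.List.index?_isSome_iff rest "@").mp (by rw [hia]; rfl)
            simp [hcy, hca, hne2, hne3]
            omega
        | some k =>
          have hcy : ("Y" : String) ∈ rest :=
            (PySem.List.index?_isSome_iff rest "Y").mp (by rw [hiy]; rfl)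
          cases hia : PySem.List.index? rest "@" with
          | none =>
            have hca : ("@" : String) ∉ rest := (PySem.List.index?_eq_none_iff rest "@").mp hia
            simp [hcy, hca, hne2, hne3]
            omega
          | some j =>
            have hca : ("@" : String) ∈ rest :=
              (PySem.List.index?_isSome_iff rest "@").mp (by rw [hia]; rfl)
            simp [hcy, hca, hne2, hne3]
            split_ifs <;> omega

-- the first decisive cell, if not "", is the first marker cell
theorem findQ_of_findP (l : List String) (c : String)
    (hP : l.find? (fun c => c == "" || c == "Y" || c == "@") = some c) (hne : c ≠ "") :
    l.find? (fun c => c == "Y" || c == "@") = some c := by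
  induction l with
  | nil => simp at hP
  | cons a rest ih =>
    by_cases hp : (a == "" || a == "Y" || a == "@") = true
    · rw [List.find?_cons_of_pos (p := fun x => x == "" || x == "Y" || x == "@") hp] at hP
      have hac : a = c := by simpa using hP
      subst hac
      have hq : (a == "Y" || a == "@") = true := by
        rcases (by simpa using hp : (a = "" ∨ a = "Y") ∨ a = "@") with (h | h) | h
        · exact absurd h hne
        · simp [h]
        · simp [h]
      rw [List.find?_cons_of_pos (p := fun x => x == "Y" || x == "@") hq]
    · have hq : ¬ (a == "Y" || a == "@") = true := by
        intro h; apply hp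
        rcases (by simpa using h : a = "Y" ∨ a = "@") with h | h <;> simp [h]
      rw [List.find?_cons_of_neg (p := fun x => x == "" || x == "Y" || x == "@") hp] at hP
      rw [List.find?_cons_of_neg (p := fun x => x == "Y" || x == "@") hq]
      exact ih hP

theorem findQ_none_of_findP_none (l : List String)
    (hP : l.find? (fun c => c == "" || c == "Y" || c == "@") = none) :
    l.find? (fun c => c == "Y" || c == "@") = none := by
  rw [List.find?_eq_none] at hP ⊢
  intro x hx h
  exact absurd (hP x hx) (by
    rcases (by simpa using h : x = "Y" ∨ x = "@") with h | h <;> simp [h])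

-- ===== VERDICT (by name: the statement is the Claim_ definition above) =====
theorem determine_new_state_spec : Claim_unchanged_determine_new_state := by
  intro s _
  unfold Spec_determine_new_state
  intro hnD
  rw [A_char, determine_new_state_alt, B_char]
  cases hP : (s.flatMap (fun row => row)).find? (fun c => c == "" || c == "Y" || c == "@") with
  | none => rw [findQ_none_of_findP_none _ hP]
  | some c =>
    by_cases hne : c = ""
    · subst hne
      have hQ : (s.flatMap (fun row => row)).find? (fun c => c == "Y" || c == "@") = some "Y" := by
        by_contra hQ
        exact hnD ((D_iff s).mpr ⟨hP, hQ⟩)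
      rw [hQ]
      decide
    · rw [findQ_of_findP _ c hP hne]

theorem determine_new_state_changed : Claim_changed_determine_new_state := by
  unfold Claim_changed_determine_new_state; decide

theorem determine_new_state_tight : Claim_exact_determine_new_state := by
  intro s _ hD
  replace hD := (D_iff s).mp hD
  rw [A_char, hD.1]
  rw [determine_new_state_alt, B_char]
  cases hQ : (s.flatMap (fun row => row)).find? (fun c => c == "Y" || c == "@") with
  | none => decide
  | some c =>
    have hc : (c == "Y" || c == "@") = true := List.find?_some (p := fun x => x == "Y" || x == "@") hQ
    rcases (by simpa using hc : c = "Y" ∨ c = "@") with h | h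
    · exact absurd (h ▸ hQ) hD.2
    · subst h; decide
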